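-- pv_equiv track=rewrite | github.com/XCMer/DAND-Data-Wrangling | transform.py | extract_street_segment
-- ===== SOURCE A (Python) =====
-- def extract_street_segment(street_name, default_first_segment=False):
--     splits = street_name.split(',')
--
--     # The order here is important
--     search_words = ['road', 'lane', 'street', 'avenue', 'plot', 'sector', '-sector',
--                     'nagar', 'area', 'bungalow', 'bungalows', 'mahal', 'estate', 'wadi',
--                     'circle', 'centre', 'towers', 'garden', 'village', 'society',
--                     'multiplex']
--     for search_word in search_words:
--         for split in splits:
--             if search_word in split.lower():
--                 return split.strip()
--
--     if default_first_segment: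
--         return street_name.split(',')[0].strip()
--     else:
--         # Just return the street name if we don't get a valid
--         # transformation
--         # This is useful during the wrangling phase
--         return street_name
-- ===== SOURCE B (Python) =====
-- def extract_street_segment(street_name, default_first_segment=False):
--     splits = street_name.split(',')
--
--     # The order here is important
--     search_words = ['road', 'lane', 'street', 'avenue', 'plot', 'sector', '-sector',
--                     'nagar', 'area', 'bungalow', 'bungalows', 'mahal', 'estate', 'wadi',
--                     'circle', 'centre', 'towers', 'garden', 'village', 'society',
--                     'multiplex']
--
--     # Single pass over the splits, keeping the best (lowest-priority-index) match;
--     # a strictly smaller index is required to replace the current best, so the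
--     # first split in order wins ties at equal priority.
--     best = None  # (priority index, split)
--     for split in splits:
--         low = split.lower()
--         for i, word in enumerate(search_words):
--             if word in low:
--                 if best is None or i < best[0]:
--                     best = (i, split)
--                 break
--
--     if best is not None:
--         return best[1].strip()
--
--     if default_first_segment:
--         return street_name.split(',')[0].strip()
--     else:
--         return street_name
-- ===== Notes on version B (the rewrite author's own statement) =====
-- stated objective: alternative
-- what changed: Replaced the keyword-major nested loop with early return by a single split-major pass that lowercases each split once and maintains a running (best priority index, split) argmin with strict-less-than updates, so ties at equal priority keep the first split.
import Mathlib
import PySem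

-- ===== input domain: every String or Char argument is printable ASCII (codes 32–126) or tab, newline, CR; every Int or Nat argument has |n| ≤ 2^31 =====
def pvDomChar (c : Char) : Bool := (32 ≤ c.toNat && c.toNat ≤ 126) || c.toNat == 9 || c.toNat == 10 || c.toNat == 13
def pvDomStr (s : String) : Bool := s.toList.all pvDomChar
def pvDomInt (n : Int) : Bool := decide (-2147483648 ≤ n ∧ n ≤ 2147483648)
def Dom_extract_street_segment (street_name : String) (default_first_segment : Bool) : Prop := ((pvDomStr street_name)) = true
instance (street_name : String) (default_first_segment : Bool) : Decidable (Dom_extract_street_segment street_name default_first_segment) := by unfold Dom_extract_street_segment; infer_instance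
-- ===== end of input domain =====

-- B replaces the keyword-major nested early-return loop by one split-major pass
-- maintaining a running (priority-index, split) argmin; same values, same cost class.

-- ===== PORT A =====
-- the priority-ordered keyword list both Python sources carry verbatim
def searchWords : List String :=
  ["road", "lane", "street", "avenue", "plot", "sector", "-sector",
   "nagar", "area", "bungalow", "bungalows", "mahal", "estate", "wadi",
   "circle", "centre", "towers", "garden", "village", "society",
   "multiplex"]

-- inner loop of A: first split containing the keyword
def innerA (w : String) : List String → Option String
  | [] => none
  | sp :: rest => if PySem.Str.isIn w (PySem.Str.lower sp) then some sp else innerA w rest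

-- outer loop of A over the keywords, early return
def loopA : List String → List String → Option String
  | [], _ => none
  | w :: ws, splits =>
    match innerA w splits with
    | some sp => some sp
    | none => loopA ws splits

def extract_street_segment (street_name : String) (default_first_segment : Bool) : String :=
  match loopA searchWords ((PySem.Str.split? street_name ",").getD []) with
  | some sp => PySem.Str.strip sp
  | none =>
    if default_first_segment then
      PySem.Str.strip ((PySem.List.pyGet? ((PySem.Str.split? street_name ",").getD []) 0).getD "")
    else street_name

-- ===== PORT B =====
-- inner scan of B: enumerate(search_words) with break = index of first keyword contained
def firstIdxB (low : String) : List String → Nat → Option Nat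
  | [], _ => none
  | w :: ws, i => if PySem.Str.isIn w low then some i else firstIdxB low ws (i + 1)

-- one step of B's split-major pass: strict-less-than argmin update
def stepB (acc : Option (Nat × String)) (sp : String) : Option (Nat × String) :=
  match firstIdxB (PySem.Str.lower sp) searchWords 0 with
  | none => acc
  | some i =>
    match acc with
    | none => some (i, sp)
    | some (bi, bs) => if i < bi then some (i, sp) else some (bi, bs)

def extract_street_segment_alt (street_name : String) (default_first_segment : Bool) : String :=
  match ((PySem.Str.split? street_name ",").getD []).foldl stepB none with
  | some (_, bs) => PySem.Str.strip bs
  | none =>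
    if default_first_segment then
      PySem.Str.strip ((PySem.List.pyGet? ((PySem.Str.split? street_name ",").getD []) 0).getD "")
    else street_name

-- ===== PRECONDITION & SPEC =====
def Spec_extract_street_segment (street_name : String) (default_first_segment : Bool) (out : String) : Prop := out = extract_street_segment_alt street_name default_first_segment
instance (street_name : String) (default_first_segment : Bool) (out : String) : Decidable (Spec_extract_street_segment street_name default_first_segment out) := by unfold Spec_extract_street_segment; infer_instance

-- ===== CLAIM (what is proved, stated in full; the proofs are below) =====
def Claim_equal_extract_street_segment : Prop := ∀ (street_name : String) (default_first_segment : Bool), Dom_extract_street_segment street_name default_first_segment → Spec_extract_street_segment street_name default_first_segment (extract_street_segment street_name default_first_segment)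

-- ===== LEMMAS AND PROOFS =====

-- left-biased min on optional (index, split) candidates: the later candidate b wins only strictly
def mergeB (a b : Option (Nat × String)) : Option (Nat × String) :=
  match a, b with
  | none, b => b
  | some p, none => some p
  | some (i, s), some (j, t) => if j < i then some (j, t) else some (i, s)

lemma mergeB_none_left (b : Option (Nat × String)) : mergeB none b = b := rfl

lemma mergeB_none_right (a : Option (Nat × String)) : mergeB a none = a := by
  cases a <;> rfl

lemma mergeB_assoc (a b c : Option (Nat × String)) :
    mergeB (mergeB a b) c = mergeB a (mergeB b c) := by
  rcases a with _ | ⟨i, s⟩ <;> rcases b with _ | ⟨j, t⟩ <;> rcases c with _ | ⟨k, u⟩ <;>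
    simp only [mergeB] <;> (try split_ifs) <;> (try (simp only [mergeB]; split_ifs)) <;>
      first | rfl | (exfalso; omega)

lemma stepB_eq (acc : Option (Nat × String)) (sp : String) :
    stepB acc sp = mergeB acc ((firstIdxB (PySem.Str.lower sp) searchWords 0).map (fun i => (i, sp))) := by
  unfold stepB
  cases h : firstIdxB (PySem.Str.lower sp) searchWords 0 with
  | none => simp [mergeB_none_right]
  | some i => rcases acc with _ | ⟨bi, bs⟩ <;> rfl

-- indexed reference for A's word-major loop
def refA : List String → List String → Nat → Option (Nat × String)
  | [], _, _ => none
  | w :: ws, splits, k =>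
    match innerA w splits with
    | some sp => some (k, sp)
    | none => refA ws splits (k + 1)

lemma loopA_eq_refA (ws splits : List String) (k : Nat) :
    loopA ws splits = (refA ws splits k).map Prod.snd := by
  induction ws generalizing k with
  | nil => rfl
  | cons w ws ih =>
    simp only [loopA, refA]
    cases innerA w splits with
    | some sp => rfl
    | none => exact ih (k + 1)

lemma refA_nil (ws : List String) (k : Nat) : refA ws [] k = none := by
  induction ws generalizing k with
  | nil => rfl
  | cons w ws ih => simpa [refA, innerA] using ih (k + 1)

lemma firstIdxB_ge (low : String) (ws : List String) (k i : Nat)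
    (h : firstIdxB low ws k = some i) : k ≤ i := by
  induction ws generalizing k with
  | nil => simp [firstIdxB] at h
  | cons w ws ih =>
    simp only [firstIdxB] at h
    split_ifs at h with hc
    · injection h with h; omega
    · exact Nat.le_of_succ_le (ih (k + 1) h)

lemma refA_ge (ws splits : List String) (k : Nat) (p : Nat × String)
    (h : refA ws splits k = some p) : k ≤ p.1 := by
  induction ws generalizing k with
  | nil => simp [refA] at h
  | cons w ws ih =>
    simp only [refA] at h
    cases hc : innerA w splits with
    | some sp => rw [hc] at h; injection h with h; subst h; exact Nat.le_refl k
    | none => rw [hc] at h; exact Nat.le_of_succ_le (ih (k + 1) h)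

lemma refA_cons (ws : List String) (sp : String) (rest : List String) (k : Nat) :
    refA ws (sp :: rest) k =
      mergeB ((firstIdxB (PySem.Str.lower sp) ws k).map (fun i => (i, sp))) (refA ws rest k) := by
  induction ws generalizing k with
  | nil => rfl
  | cons w ws ih =>
    by_cases hc : PySem.Str.isIn w (PySem.Str.lower sp) = true
    · -- w occurs in sp: A picks sp here; any candidate from rest has index ≥ k
      have h1 : innerA w (sp :: rest) = some sp := by
        simp only [innerA]; rw [if_pos hc]
      have h2 : firstIdxB (PySem.Str.lower sp) (w :: ws) k = some k := by
        simp only [firstIdxB]; rw [if_pos hc]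
      rw [show refA (w :: ws) (sp :: rest) k = some (k, sp) by simp only [refA, h1]]
      rw [h2]
      cases hr : refA (w :: ws) rest k with
      | none => rfl
      | some p =>
        have := refA_ge (w :: ws) rest k p hr
        simp only [Option.map_some, mergeB]
        rw [if_neg (by omega)]
    · have h2 : firstIdxB (PySem.Str.lower sp) (w :: ws) k = firstIdxB (PySem.Str.lower sp) ws (k + 1) := by
        simp only [firstIdxB]; rw [if_neg hc]
      cases hr : innerA w rest with
      | some t =>
        -- w occurs in a later split: any keyword in sp scanned later has index > k
        have hin : innerA w (sp :: rest) = some t := by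
          simp only [innerA]; rw [if_neg hc]; exact hr
        have h1 : refA (w :: ws) (sp :: rest) k = some (k, t) := by simp only [refA, hin]
        have h3 : refA (w :: ws) rest k = some (k, t) := by simp only [refA, hr]
        rw [h1, h3, h2]
        cases hf : firstIdxB (PySem.Str.lower sp) ws (k + 1) with
        | none => rfl
        | some i =>
          have := firstIdxB_ge (PySem.Str.lower sp) ws (k + 1) i hf
          simp only [Option.map_some, mergeB]
          rw [if_pos (by omega)]
      | none =>
        have hin : innerA w (sp :: rest) = none := by
          simp only [innerA]; rw [if_neg hc]; exact hr
        have h1 : refA (w :: ws) (sp :: rest) k = refA ws (sp :: rest) (k + 1) := by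
          simp only [refA, hin]
        have h3 : refA (w :: ws) rest k = refA ws rest (k + 1) := by simp only [refA, hr]
        rw [h1, h3, h2, ih (k + 1)]

lemma foldl_stepB (splits : List String) (acc : Option (Nat × String)) :
    splits.foldl stepB acc = mergeB acc (refA searchWords splits 0) := by
  induction splits generalizing acc with
  | nil => simp [refA_nil, mergeB_none_right]
  | cons sp rest ih =>
    rw [List.foldl_cons, ih (stepB acc sp), stepB_eq, mergeB_assoc, ← refA_cons]

theorem ports_agree (street_name : String) (default_first_segment : Bool) :
    extract_street_segment street_name default_first_segment
      = extract_street_segment_alt street_name default_first_segment := by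
  unfold extract_street_segment extract_street_segment_alt
  rw [foldl_stepB, mergeB_none_left,
    loopA_eq_refA searchWords ((PySem.Str.split? street_name ",").getD []) 0]
  cases refA searchWords ((PySem.Str.split? street_name ",").getD []) 0 with
  | none => rfl
  | some p => rfl

-- ===== VERDICT (by name: the statement is the Claim_ definition above) =====
theorem extract_street_segment_spec : Claim_equal_extract_street_segment := by
  intro street_name default_first_segment _
  unfold Spec_extract_street_segment
  exact ports_agree street_name default_first_segment
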